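-- pv_equiv track=rewrite | github.com/Ag3497120/verantyx-v6 | synth_results/d43fd935.py | transform
-- ===== SOURCE A (Python) =====
-- def transform(grid):
--     rows = len(grid); cols = len(grid[0])
--     result = [row[:] for row in grid]
--     cluster = [(r,c) for r in range(rows) for c in range(cols) if grid[r][c]==3]
--     if not cluster: return result
--     minr=min(r for r,c in cluster); maxr=max(r for r,c in cluster)
--     minc=min(c for r,c in cluster); maxc=max(c for r,c in cluster)
--     for r in range(rows):
--         for c in range(cols):
--             v = grid[r][c]
--             if v in (0,3): continue
--             if minr <= r <= maxr:
--                 if c < minc: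
--                     for cc in range(c+1, minc): result[r][cc] = v
--                 elif c > maxc:
--                     for cc in range(maxc+1, c): result[r][cc] = v
--             elif minc <= c <= maxc:
--                 if r < minr:
--                     for rr in range(r+1, minr): result[rr][c] = v
--                 elif r > maxr:
--                     for rr in range(maxr+1, r): result[rr][c] = v
--     return result
-- ===== SOURCE B (Python) =====
-- def transform(grid):
--     rows = len(grid); cols = len(grid[0])
--     result = [row[:] for row in grid]
--     threes = [(r, c) for r in range(rows) for c in range(cols) if grid[r][c] == 3]
--     if not threes:
--         return result
--     minr = min(r for r, c in threes); maxr = max(r for r, c in threes)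
--     minc = min(c for r, c in threes); maxc = max(c for r, c in threes)
--
--     def is_src(v):
--         return v != 0 and v != 3
--
--     # Pull model: instead of pushing fill loops out of every source (A), each
--     # border cell looks up the single source whose write would land last on it.
--     for r in range(minr, maxr + 1):
--         for c in range(minc):
--             # nearest source strictly to the left wins
--             for j in range(c - 1, -1, -1):
--                 if is_src(grid[r][j]):
--                     result[r][c] = grid[r][j]
--                     break
--         for c in range(maxc + 1, cols):
--             # rightmost source strictly to the right wins
--             for j in range(cols - 1, c, -1):
--                 if is_src(grid[r][j]):
--                     result[r][c] = grid[r][j]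
--                     break
--     for c in range(minc, maxc + 1):
--         for r in range(minr):
--             # nearest source strictly above wins
--             for i in range(r - 1, -1, -1):
--                 if is_src(grid[i][c]):
--                     result[r][c] = grid[i][c]
--                     break
--         for r in range(maxr + 1, rows):
--             # bottommost source strictly below wins
--             for i in range(rows - 1, r, -1):
--                 if is_src(grid[i][c]):
--                     result[r][c] = grid[i][c]
--                     break
--     return result
-- ===== Notes on version B (the rewrite author's own statement) =====
-- stated objective: faster
-- what changed: A pushes: for every colored cell it runs a nested fill loop writing its value over the whole trail toward the bounding box, later fills overwriting earlier ones; B pulls: it visits only the four trail regions around the box once and each trail cell looks up the single source whose fill would land last on it (nearest source on the min side, farthest on the max side), so every cell is written at most once and cells outside the trail regions are never touched.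
import Mathlib
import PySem

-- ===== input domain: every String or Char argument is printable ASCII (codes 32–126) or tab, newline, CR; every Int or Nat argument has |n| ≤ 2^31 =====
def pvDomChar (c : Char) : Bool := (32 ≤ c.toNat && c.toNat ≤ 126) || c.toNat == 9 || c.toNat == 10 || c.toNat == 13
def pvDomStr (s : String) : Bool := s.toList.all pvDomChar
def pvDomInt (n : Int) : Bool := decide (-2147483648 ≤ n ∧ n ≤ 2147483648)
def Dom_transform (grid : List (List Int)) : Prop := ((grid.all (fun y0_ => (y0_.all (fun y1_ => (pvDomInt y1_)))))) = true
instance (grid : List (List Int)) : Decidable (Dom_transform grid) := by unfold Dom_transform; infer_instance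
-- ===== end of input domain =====

-- B replaces A's push-style fill loops out of every colored cell by a pull-style pass over the
-- four trail regions around the cluster bounding box (each trail cell looks up the one source
-- whose fill lands last on it), writing every cell at most once; measurably faster by a
-- constant factor. Equivalence is proved on the inputs where A does not raise.

-- shared write primitive: `result[r][c] = v`.  Exact under Pre_transform: every write both
-- programs perform has 0 ≤ r, 0 ≤ c in range, where List.modify/List.set agree with Python's
-- item assignment (out of range Python raises; such writes do not occur under Pre_transform).
def pvSet (res : List (List Int)) (r c : Int) (v : Int) : List (List Int) :=
  res.modify r.toNat (fun row => row.set c.toNat v)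

-- ===== PORT A =====
def transform (grid : List (List Int)) : List (List Int) :=
  let rows : Int := grid.length
  let cols : Int := (PySem.List.pyGetD grid 0 []).length
  let result := grid.map (fun row => row)
  let cluster := (PySem.List.pyRange 0 rows).flatMap (fun r =>
    ((PySem.List.pyRange 0 cols).filter (fun c =>
      PySem.List.pyGetD (PySem.List.pyGetD grid r []) c 0 == 3)).map (fun c => (r, c)))
  if cluster.isEmpty then result else
  let minr := (PySem.List.min? (cluster.map Prod.fst) (fun x => x)).getD 0
  let maxr := (PySem.List.max? (cluster.map Prod.fst) (fun x => x)).getD 0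
  let minc := (PySem.List.min? (cluster.map Prod.snd) (fun x => x)).getD 0
  let maxc := (PySem.List.max? (cluster.map Prod.snd) (fun x => x)).getD 0
  (PySem.List.pyRange 0 rows).foldl (fun result r =>
    (PySem.List.pyRange 0 cols).foldl (fun result c =>
      let v := PySem.List.pyGetD (PySem.List.pyGetD grid r []) c 0
      if v == 0 || v == 3 then result
      else if minr ≤ r ∧ r ≤ maxr then
        (if c < minc then
          (PySem.List.pyRange (c+1) minc).foldl (fun result cc => pvSet result r cc v) result
         else if maxc < c then
          (PySem.List.pyRange (maxc+1) c).foldl (fun result cc => pvSet result r cc v) result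
         else result)
      else if minc ≤ c ∧ c ≤ maxc then
        (if r < minr then
          (PySem.List.pyRange (r+1) minr).foldl (fun result rr => pvSet result rr c v) result
         else if maxr < r then
          (PySem.List.pyRange (maxr+1) r).foldl (fun result rr => pvSet result rr c v) result
         else result)
      else result) result) result

-- ===== PORT B =====
def transform_alt (grid : List (List Int)) : List (List Int) :=
  let rows : Int := grid.length
  let cols : Int := (PySem.List.pyGetD grid 0 []).length
  let result := grid.map (fun row => row)
  let threes := (PySem.List.pyRange 0 rows).flatMap (fun r =>
    ((PySem.List.pyRange 0 cols).filter (fun c =>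
      PySem.List.pyGetD (PySem.List.pyGetD grid r []) c 0 == 3)).map (fun c => (r, c)))
  if threes.isEmpty then result else
  let minr := (PySem.List.min? (threes.map Prod.fst) (fun x => x)).getD 0
  let maxr := (PySem.List.max? (threes.map Prod.fst) (fun x => x)).getD 0
  let minc := (PySem.List.min? (threes.map Prod.snd) (fun x => x)).getD 0
  let maxc := (PySem.List.max? (threes.map Prod.snd) (fun x => x)).getD 0
  let isSrc : Int → Bool := fun v => v ≠ 0 && v ≠ 3
  let get : Int → Int → Int := fun r c => PySem.List.pyGetD (PySem.List.pyGetD grid r []) c 0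
  let result := (PySem.List.pyRange minr (maxr+1)).foldl (fun result r =>
    let result := (PySem.List.pyRange 0 minc).foldl (fun result c =>
      -- nearest source strictly to the left wins (loop with break = find?)
      match (PySem.List.pyRange (c-1) (-1) (-1)).find? (fun j => isSrc (get r j)) with
      | some j => pvSet result r c (get r j)
      | none => result) result
    (PySem.List.pyRange (maxc+1) cols).foldl (fun result c =>
      -- rightmost source strictly to the right wins
      match (PySem.List.pyRange (cols-1) c (-1)).find? (fun j => isSrc (get r j)) with
      | some j => pvSet result r c (get r j)
      | none => result) result) result
  (PySem.List.pyRange minc (maxc+1)).foldl (fun result c =>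
    let result := (PySem.List.pyRange 0 minr).foldl (fun result r =>
      -- nearest source strictly above wins
      match (PySem.List.pyRange (r-1) (-1) (-1)).find? (fun i => isSrc (get i c)) with
      | some i => pvSet result r c (get i c)
      | none => result) result
    (PySem.List.pyRange (maxr+1) rows).foldl (fun result r =>
      -- bottommost source strictly below wins
      match (PySem.List.pyRange (rows-1) r (-1)).find? (fun i => isSrc (get i c)) with
      | some i => pvSet result r c (get i c)
      | none => result) result) result

-- ===== PRECONDITION & SPEC =====
-- Pre_: exactly the inputs on which the Python A returns (A raises IndexError on the empty
-- grid and on grids having a row shorter than the first row; B raises there as well).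
-- The Lean ports are total (out-of-range writes are no-ops) and agree even beyond Pre_;
-- Pre_ marks where the ports are exact transcriptions of their Pythons.
def Pre_transform (grid : List (List Int)) : Prop :=
  grid ≠ [] ∧ ∀ row ∈ grid, (grid.headD []).length ≤ row.length
instance (grid : List (List Int)) : Decidable (Pre_transform grid) := by
  unfold Pre_transform; infer_instance
def pvWitness_transform : List (List Int) := [[3, 1], [0, 0]]

def Spec_transform (grid : List (List Int)) (out : List (List Int)) : Prop := out = transform_alt grid
instance (grid : List (List Int)) (out : List (List Int)) : Decidable (Spec_transform grid out) := by unfold Spec_transform; infer_instance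

-- ===== CLAIM (what is proved, stated in full; the proofs are below) =====
def Claim_equal_transform : Prop := ∀ (grid : List (List Int)), Dom_transform grid → Pre_transform grid → Spec_transform grid (transform grid)

-- ===== LEMMAS AND PROOFS =====
-- Proof plan: each port is rewritten as one list of cell writes applied in order
-- (transform_eq / transform_alt_eq); the final value of a cell is the last matching
-- write (gg_foldl_appW); for each of the four trail regions the matching writes of A
-- form an ordered filter of the scan line whose last element is exactly the find? that
-- B performs (hitsA_*/hitsB_*, region_compare), and outside the regions both lists are
-- empty (hitsA_nil/hitsB_nil).

def gg (g : List (List Int)) (i j : Nat) : Int := (g.getD i []).getD j 0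
def ggRowLen (g : List (List Int)) (i : Nat) : Nat := (g.getD i []).length
def appW (res : List (List Int)) (w : Int × Int × Int) : List (List Int) := pvSet res w.1 w.2.1 w.2.2
def hitsAt (i j : Nat) (ws : List (Int × Int × Int)) : List Int :=
  ws.filterMap (fun w => if w.1.toNat = i ∧ w.2.1.toNat = j then some w.2.2 else none)

theorem len_pvSet (res : List (List Int)) (r c v : Int) : (pvSet res r c v).length = res.length := by
  simp [pvSet]


theorem rowLen_pvSet (res : List (List Int)) (r c v : Int) (i : Nat) :
    ggRowLen (pvSet res r c v) i = ggRowLen res i := by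
  simp only [ggRowLen, pvSet, List.getD_eq_getElem?_getD, List.getElem?_modify]
  cases res[i]? <;> by_cases h : r.toNat = i <;> simp [h]

theorem gg_pvSet_ne (res : List (List Int)) (r c v : Int) (i j : Nat)
    (h : r.toNat ≠ i ∨ c.toNat ≠ j) :
    gg (pvSet res r c v) i j = gg res i j := by
  simp only [gg, pvSet, List.getD_eq_getElem?_getD, List.getElem?_modify]
  cases hrow : res[i]? with
  | none => simp
  | some row =>
    by_cases hi : r.toNat = i
    · rcases h with h | h
      · exact absurd hi h
      · simp [hi, List.getElem?_set_ne h]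
    · simp [hi]

theorem gg_pvSet_self (res : List (List Int)) (r c v : Int)
    (hi : r.toNat < res.length) (hj : c.toNat < ggRowLen res r.toNat) :
    gg (pvSet res r c v) r.toNat c.toNat = v := by
  simp only [gg, ggRowLen, pvSet, List.getD_eq_getElem?_getD, List.getElem?_modify] at *
  rw [List.getElem?_eq_getElem hi] at *
  simp only [if_true, Option.map_eq_map, Option.map_some, Option.getD_some] at *
  rw [List.getElem?_set_self (by simpa using hj)]
  simp

theorem len_foldl_appW (ws : List (Int × Int × Int)) (res : List (List Int)) :
    (ws.foldl appW res).length = res.length := by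
  induction ws generalizing res with
  | nil => rfl
  | cons w t ih => simp [List.foldl_cons, ih, appW, len_pvSet]

theorem rowLen_foldl_appW (ws : List (Int × Int × Int)) (res : List (List Int)) (i : Nat) :
    ggRowLen (ws.foldl appW res) i = ggRowLen res i := by
  induction ws generalizing res with
  | nil => rfl
  | cons w t ih => simp [List.foldl_cons, ih, appW, rowLen_pvSet]

theorem hitsAt_append (i j : Nat) (ws₁ ws₂ : List (Int × Int × Int)) :
    hitsAt i j (ws₁ ++ ws₂) = hitsAt i j ws₁ ++ hitsAt i j ws₂ := by
  simp [hitsAt]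

theorem gg_foldl_appW (ws : List (Int × Int × Int)) (res : List (List Int)) (i j : Nat)
    (hi : i < res.length) (hj : j < ggRowLen res i) :
    gg (ws.foldl appW res) i j = (hitsAt i j ws).getLast?.getD (gg res i j) := by
  induction ws using List.reverseRecOn with
  | nil => simp [hitsAt]
  | append_singleton t w ih =>
    rw [List.foldl_append, List.foldl_cons, List.foldl_nil, hitsAt_append]
    by_cases hm : w.1.toNat = i ∧ w.2.1.toNat = j
    · have h1 : gg (appW (t.foldl appW res) w) i j = w.2.2 := by
        rw [← hm.1, ← hm.2, appW]
        exact gg_pvSet_self _ _ _ _ (by rw [len_foldl_appW, hm.1]; exact hi)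
          (by rw [rowLen_foldl_appW, hm.1, hm.2]; exact hj)
      rw [h1]
      simp [hitsAt, hm]
    · have h1 : gg (appW (t.foldl appW res) w) i j = gg (t.foldl appW res) i j := by
        apply gg_pvSet_ne
        by_cases h : w.1.toNat = i
        · exact Or.inr (fun hc => hm ⟨h, hc⟩)
        · exact Or.inl h
      rw [h1, ih]
      have : hitsAt i j [w] = [] := by simp [hitsAt, hm]
      simp [this]

theorem pyRange_nil_of_le {a b : Int} (h : b ≤ a) : PySem.List.pyRange a b = [] := by
  rw [PySem.List.pyRange_of_pos a b Int.zero_lt_one]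
  simp [show ¬ a < b by omega]

theorem pyRange_neg_nil {a b : Int} (h : a ≤ b) : PySem.List.pyRange a b (-1) = [] := by
  rw [PySem.List.pyRange_of_neg a b (by norm_num)]
  simp [show ¬ b < a by omega]

theorem pyRange_desc_rev_aux (n : Nat) : ∀ (a : Int),
    PySem.List.pyRange (a + n) a (-1) = (PySem.List.pyRange (a + 1) (a + n + 1)).reverse := by
  induction n with
  | zero =>
    intro a
    rw [pyRange_neg_nil (by omega), pyRange_nil_of_le (by omega)]
    rfl
  | succ m ih =>
    intro a
    rw [PySem.List.pyRange_neg_one_cons (by omega)]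
    rw [PySem.List.pyRange_one_succ_right (by omega)]
    rw [List.reverse_append]
    rw [show (a + ((m+1:Nat):Int) - 1) = a + (m:Int) by push_cast; ring,
        show (a + ((m+1:Nat):Int)) = a + (m:Int) + 1 by push_cast; ring, ih a]
    simp

theorem pyRange_desc_rev (a b : Int) :
    PySem.List.pyRange (b - 1) a (-1) = (PySem.List.pyRange (a + 1) b).reverse := by
  by_cases h : a + 1 ≤ b - 1 + 1
  · obtain ⟨n, hn⟩ : ∃ n : Nat, b - 1 = a + n := ⟨(b - 1 - a).toNat, by omega⟩
    rw [hn, show b = a + (n:Int) + 1 by omega]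
    exact pyRange_desc_rev_aux n a
  · rw [pyRange_neg_nil (by omega), pyRange_nil_of_le (by omega)]
    rfl

theorem flatMap_nil_of_all {α : Type} (l : List Int) (g : Int → List α)
    (h : ∀ x ∈ l, g x = []) : l.flatMap g = [] := by
  simp [List.flatMap_eq_nil_iff]; exact h

theorem flatMap_pyRange_single {α : Type} (a b x : Int) (g : Int → List α)
    (hax : a ≤ x) (hxb : x < b)
    (h : ∀ r, a ≤ r → r < b → r ≠ x → g r = []) :
    (PySem.List.pyRange a b).flatMap g = g x := by
  rw [PySem.List.pyRange_one_append a x b (by omega) (by omega)]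
  rw [PySem.List.pyRange_one_cons (show x < b by omega)]
  rw [List.flatMap_append, List.flatMap_cons]
  rw [flatMap_nil_of_all _ g (fun r hr => by
    have := PySem.List.mem_pyRange_one.mp hr; exact h r (by omega) (by omega) (by omega))]
  rw [flatMap_nil_of_all _ g (fun r hr => by
    have := PySem.List.mem_pyRange_one.mp hr; exact h r (by omega) (by omega) (by omega))]
  simp

theorem flatMap_ite_singleton {α : Type} (l : List Int) (p : Int → Bool) (f : Int → α) :
    (l.flatMap (fun x => if p x then [f x] else [])) = (l.filter p).map f := by
  induction l with
  | nil => rfl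
  | cons h t ih => by_cases hp : p h <;> simp [List.filter_cons, hp, ih]

theorem head?_map_find? {α : Type} (l : List Int) (p : Int → Bool) (f : Int → α) :
    ((l.filter p).map f).head? = (l.find? p).map f := by
  induction l with
  | nil => rfl
  | cons h t ih => by_cases hp : p h <;> simp [List.filter_cons, List.find?_cons, hp, ih]

theorem getLast?_filter_map {α : Type} (l : List Int) (p : Int → Bool) (f : Int → α) :
    ((l.filter p).map f).getLast? = (l.reverse.find? p).map f := by
  rw [List.getLast?_eq_head?_reverse, ← List.map_reverse, ← List.filter_reverse]
  exact head?_map_find? _ _ _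
def rowsOf (grid : List (List Int)) : Int := grid.length
def colsOf (grid : List (List Int)) : Int := (PySem.List.pyGetD grid 0 []).length
def getC (grid : List (List Int)) (r c : Int) : Int :=
  PySem.List.pyGetD (PySem.List.pyGetD grid r []) c 0
def srcB (v : Int) : Bool := v ≠ 0 && v ≠ 3

def clusterOf (grid : List (List Int)) : List (Int × Int) :=
  (PySem.List.pyRange 0 (rowsOf grid)).flatMap (fun r =>
    ((PySem.List.pyRange 0 (colsOf grid)).filter (fun c =>
      PySem.List.pyGetD (PySem.List.pyGetD grid r []) c 0 == 3)).map (fun c => (r, c)))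

def minrOf (grid : List (List Int)) : Int :=
  (PySem.List.min? ((clusterOf grid).map Prod.fst) (fun x => x)).getD 0
def maxrOf (grid : List (List Int)) : Int :=
  (PySem.List.max? ((clusterOf grid).map Prod.fst) (fun x => x)).getD 0
def mincOf (grid : List (List Int)) : Int :=
  (PySem.List.min? ((clusterOf grid).map Prod.snd) (fun x => x)).getD 0
def maxcOf (grid : List (List Int)) : Int :=
  (PySem.List.max? ((clusterOf grid).map Prod.snd) (fun x => x)).getD 0

def cellWrites (grid : List (List Int)) (minr maxr minc maxc r c : Int) :
    List (Int × Int × Int) :=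
  let v := getC grid r c
  if v == 0 || v == 3 then []
  else if minr ≤ r ∧ r ≤ maxr then
    (if c < minc then (PySem.List.pyRange (c+1) minc).map (fun cc => (r, cc, v))
     else if maxc < c then (PySem.List.pyRange (maxc + 1) c).map (fun cc => (r, cc, v))
     else [])
  else if minc ≤ c ∧ c ≤ maxc then
    (if r < minr then (PySem.List.pyRange (r+1) minr).map (fun rr => (rr, c, v))
     else if maxr < r then (PySem.List.pyRange (maxr + 1) r).map (fun rr => (rr, c, v))
     else [])
  else []

def wsA (grid : List (List Int)) : List (Int × Int × Int) :=
  (PySem.List.pyRange 0 (rowsOf grid)).flatMap (fun r =>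
    (PySem.List.pyRange 0 (colsOf grid)).flatMap (fun c =>
      cellWrites grid (minrOf grid) (maxrOf grid) (mincOf grid) (maxcOf grid) r c))

def pullL (grid : List (List Int)) (r c : Int) : List (Int × Int × Int) :=
  match (PySem.List.pyRange (c-1) (-1) (-1)).find? (fun j => srcB (getC grid r j)) with
  | some j => [(r, c, getC grid r j)]
  | none => []
def pullR (grid : List (List Int)) (cols r c : Int) : List (Int × Int × Int) :=
  match (PySem.List.pyRange (cols - 1) c (-1)).find? (fun j => srcB (getC grid r j)) with
  | some j => [(r, c, getC grid r j)]
  | none => []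
def pullT (grid : List (List Int)) (r c : Int) : List (Int × Int × Int) :=
  match (PySem.List.pyRange (r-1) (-1) (-1)).find? (fun i => srcB (getC grid i c)) with
  | some i => [(r, c, getC grid i c)]
  | none => []
def pullB (grid : List (List Int)) (rows r c : Int) : List (Int × Int × Int) :=
  match (PySem.List.pyRange (rows - 1) r (-1)).find? (fun i => srcB (getC grid i c)) with
  | some i => [(r, c, getC grid i c)]
  | none => []

def wsB (grid : List (List Int)) : List (Int × Int × Int) :=
  (PySem.List.pyRange (minrOf grid) (maxrOf grid + 1)).flatMap (fun r =>
    (PySem.List.pyRange 0 (mincOf grid)).flatMap (fun c => pullL grid r c)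
    ++ (PySem.List.pyRange (maxcOf grid + 1) (colsOf grid)).flatMap (fun c =>
        pullR grid (colsOf grid) r c))
  ++ (PySem.List.pyRange (mincOf grid) (maxcOf grid + 1)).flatMap (fun c =>
    (PySem.List.pyRange 0 (minrOf grid)).flatMap (fun r => pullT grid r c)
    ++ (PySem.List.pyRange (maxrOf grid + 1) (rowsOf grid)).flatMap (fun r =>
        pullB grid (rowsOf grid) r c))

theorem cellWrites_foldl (grid : List (List Int)) (minr maxr minc maxc r c : Int)
    (acc : List (List Int)) :
    (cellWrites grid minr maxr minc maxc r c).foldl appW acc =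
      (let v := PySem.List.pyGetD (PySem.List.pyGetD grid r []) c 0
       if v == 0 || v == 3 then acc
       else if minr ≤ r ∧ r ≤ maxr then
         (if c < minc then
           (PySem.List.pyRange (c+1) minc).foldl (fun result cc => pvSet result r cc v) acc
          else if maxc < c then
           (PySem.List.pyRange (maxc + 1) c).foldl (fun result cc => pvSet result r cc v) acc
          else acc)
       else if minc ≤ c ∧ c ≤ maxc then
         (if r < minr then
           (PySem.List.pyRange (r+1) minr).foldl (fun result rr => pvSet result rr c v) acc
          else if maxr < r then
           (PySem.List.pyRange (maxr + 1) r).foldl (fun result rr => pvSet result rr c v) acc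
          else acc)
       else acc) := by
  unfold cellWrites getC
  split_ifs <;> simp [List.foldl_map, appW] <;> split_ifs <;> simp [List.foldl_map, appW]

theorem transform_eq (grid : List (List Int)) :
    transform grid =
      if (clusterOf grid).isEmpty then grid.map (fun row => row)
      else (wsA grid).foldl appW (grid.map (fun row => row)) := by
  have hdef : transform grid =
      (if (clusterOf grid).isEmpty then grid.map (fun row => row)
       else
        (PySem.List.pyRange 0 (rowsOf grid)).foldl (fun result r =>
          (PySem.List.pyRange 0 (colsOf grid)).foldl (fun result c =>
            let v := PySem.List.pyGetD (PySem.List.pyGetD grid r []) c 0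
            if v == 0 || v == 3 then result
            else if minrOf grid ≤ r ∧ r ≤ maxrOf grid then
              (if c < mincOf grid then
                (PySem.List.pyRange (c+1) (mincOf grid)).foldl
                  (fun result cc => pvSet result r cc v) result
               else if maxcOf grid < c then
                (PySem.List.pyRange (maxcOf grid + 1) c).foldl
                  (fun result cc => pvSet result r cc v) result
               else result)
            else if mincOf grid ≤ c ∧ c ≤ maxcOf grid then
              (if r < minrOf grid then
                (PySem.List.pyRange (r+1) (minrOf grid)).foldl
                  (fun result rr => pvSet result rr c v) result
               else if maxrOf grid < r then
                (PySem.List.pyRange (maxrOf grid + 1) r).foldl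
                  (fun result rr => pvSet result rr c v) result
               else result)
            else result) result) (grid.map (fun row => row))) := rfl
  rw [hdef]
  unfold wsA
  split_ifs with h
  · rfl
  · rw [List.foldl_flatMap]
    refine PySem.List.foldl_congr_mem _ _ _ _ (fun acc r hr => ?_)
    rw [List.foldl_flatMap]
    refine PySem.List.foldl_congr_mem _ _ _ _ (fun acc2 c hc => ?_)
    exact (cellWrites_foldl grid _ _ _ _ r c acc2).symm

theorem pull_foldl (acc : List (List Int)) (find : Option Int) (r c : Int) (g : Int → Int) :
    ((match find with | some j => [(r, c, g j)] | none => []) : List (Int × Int × Int)).foldl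
        appW acc =
      (match find with | some j => pvSet acc r c (g j) | none => acc) := by
  cases find <;> simp [appW]

theorem foldl2_congr {α β : Type} (l1 l2 : List α) (F1 G1 F2 G2 : β → α → β) (acc : β)
    (h1 : ∀ (a : β), ∀ x ∈ l1, F1 a x = G1 a x) (h2 : ∀ (a : β), ∀ x ∈ l2, F2 a x = G2 a x) :
    List.foldl F2 (List.foldl F1 acc l1) l2 = List.foldl G2 (List.foldl G1 acc l1) l2 := by
  rw [PySem.List.foldl_congr_mem _ _ _ _ h1, PySem.List.foldl_congr_mem _ _ _ _ h2]

theorem transform_alt_eq (grid : List (List Int)) :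
    transform_alt grid =
      if (clusterOf grid).isEmpty then grid.map (fun row => row)
      else (wsB grid).foldl appW (grid.map (fun row => row)) := by
  have hdef : transform_alt grid =
      (if (clusterOf grid).isEmpty then grid.map (fun row => row)
       else
        (PySem.List.pyRange (mincOf grid) (maxcOf grid + 1)).foldl (fun result c =>
          (PySem.List.pyRange (maxrOf grid + 1) (rowsOf grid)).foldl (fun result r =>
            match (PySem.List.pyRange (rowsOf grid - 1) r (-1)).find?
                (fun i => srcB (getC grid i c)) with
            | some i => pvSet result r c (getC grid i c)
            | none => result)
          ((PySem.List.pyRange 0 (minrOf grid)).foldl (fun result r =>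
            match (PySem.List.pyRange (r - 1) (-1) (-1)).find?
                (fun i => srcB (getC grid i c)) with
            | some i => pvSet result r c (getC grid i c)
            | none => result) result))
        ((PySem.List.pyRange (minrOf grid) (maxrOf grid + 1)).foldl (fun result r =>
          (PySem.List.pyRange (maxcOf grid + 1) (colsOf grid)).foldl (fun result c =>
            match (PySem.List.pyRange (colsOf grid - 1) c (-1)).find?
                (fun j => srcB (getC grid r j)) with
            | some j => pvSet result r c (getC grid r j)
            | none => result)
          ((PySem.List.pyRange 0 (mincOf grid)).foldl (fun result c =>
            match (PySem.List.pyRange (c - 1) (-1) (-1)).find?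
                (fun j => srcB (getC grid r j)) with
            | some j => pvSet result r c (getC grid r j)
            | none => result) result))
         (grid.map (fun row => row)))) := rfl
  rw [hdef]
  unfold wsB
  split_ifs with h
  · rfl
  · rw [List.foldl_append]
    rw [List.foldl_flatMap, List.foldl_flatMap]
    have hrow : ∀ (init : List (List Int)),
        List.foldl (fun acc r => List.foldl appW acc
            ((PySem.List.pyRange 0 (mincOf grid)).flatMap (fun c => pullL grid r c)
             ++ (PySem.List.pyRange (maxcOf grid + 1) (colsOf grid)).flatMap
                  (fun c => pullR grid (colsOf grid) r c))) init
          (PySem.List.pyRange (minrOf grid) (maxrOf grid + 1)) =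
        List.foldl (fun result r =>
            List.foldl (fun result c =>
              match (PySem.List.pyRange (colsOf grid - 1) c (-1)).find?
                  (fun j => srcB (getC grid r j)) with
              | some j => pvSet result r c (getC grid r j)
              | none => result)
            (List.foldl (fun result c =>
              match (PySem.List.pyRange (c - 1) (-1) (-1)).find?
                  (fun j => srcB (getC grid r j)) with
              | some j => pvSet result r c (getC grid r j)
              | none => result) result (PySem.List.pyRange 0 (mincOf grid)))
            (PySem.List.pyRange (maxcOf grid + 1) (colsOf grid))) init
          (PySem.List.pyRange (minrOf grid) (maxrOf grid + 1)) := by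
      intro init
      refine PySem.List.foldl_congr_mem _ _ _ _ (fun acc r hr => ?_)
      rw [List.foldl_append, List.foldl_flatMap, List.foldl_flatMap]
      refine foldl2_congr _ _ _ _ _ _ _ (fun a2 c hc => ?_) (fun a2 c hc => ?_)
      · simp only [pullL]; exact pull_foldl a2 _ r c _
      · simp only [pullR]; exact pull_foldl a2 _ r c _
    rw [hrow]
    refine PySem.List.foldl_congr_mem _ _ _ _ (fun acc c hc => ?_)
    rw [List.foldl_append, List.foldl_flatMap, List.foldl_flatMap]
    refine foldl2_congr _ _ _ _ _ _ _ (fun a2 r hr => ?_) (fun a2 r hr => ?_)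
    · simp only [pullT]; exact (pull_foldl a2 _ r c _).symm
    · simp only [pullB]; exact (pull_foldl a2 _ r c _).symm

theorem filterMap_pyRange_single {α : Type} (a b x : Int) (f : Int → Option α)
    (hax : a ≤ x) (hxb : x < b) (h : ∀ r, a ≤ r → r < b → r ≠ x → f r = none) :
    (PySem.List.pyRange a b).filterMap f = (f x).toList := by
  have : ∀ (l : List Int), l.filterMap f = l.flatMap (fun r => (f r).toList) := by
    intro l; induction l with
    | nil => rfl
    | cons hd t ih => cases hfd : f hd <;> simp [List.filterMap_cons, hfd, ih]
  rw [this, flatMap_pyRange_single a b x _ hax hxb (fun r h1 h2 h3 => by rw [h r h1 h2 h3]; rfl)]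

theorem hits_rowSeg (a b r v : Int) (i j : Nat) (ha : 0 ≤ a) (hr : 0 ≤ r) :
    hitsAt i j ((PySem.List.pyRange a b).map (fun cc => (r, cc, v))) =
      if r.toNat = i ∧ a ≤ (j:Int) ∧ (j:Int) < b then [v] else [] := by
  unfold hitsAt
  rw [List.filterMap_map]
  by_cases hri : r.toNat = i
  · by_cases hj : a ≤ (j:Int) ∧ (j:Int) < b
    · rw [show (PySem.List.pyRange a b).filterMap
          ((fun w => if w.1.toNat = i ∧ w.2.1.toNat = j then some w.2.2 else none) ∘
            (fun cc => (r, cc, v))) = _ from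
          filterMap_pyRange_single a b (j:Int) _ hj.1 hj.2 (fun cc h1 h2 h3 => by
            simp only [Function.comp]
            have : ¬ cc.toNat = j := by omega
            simp [this])]
      simp [hri, hj]
    · rw [if_neg (by tauto)]
      refine List.filterMap_eq_nil_iff.mpr (fun cc hcc => ?_)
      have := PySem.List.mem_pyRange_one.mp hcc
      have hne : ¬ cc.toNat = j := by omega
      simp [Function.comp, hne]
  · rw [if_neg (by tauto)]
    refine List.filterMap_eq_nil_iff.mpr (fun cc hcc => ?_)
    simp [Function.comp, hri]

theorem hits_colSeg (a b c v : Int) (i j : Nat) (ha : 0 ≤ a) (hc : 0 ≤ c) :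
    hitsAt i j ((PySem.List.pyRange a b).map (fun rr => (rr, c, v))) =
      if c.toNat = j ∧ a ≤ (i:Int) ∧ (i:Int) < b then [v] else [] := by
  unfold hitsAt
  rw [List.filterMap_map]
  by_cases hcj : c.toNat = j
  · by_cases hi : a ≤ (i:Int) ∧ (i:Int) < b
    · rw [show (PySem.List.pyRange a b).filterMap
          ((fun w => if w.1.toNat = i ∧ w.2.1.toNat = j then some w.2.2 else none) ∘
            (fun rr => (rr, c, v))) = _ from
          filterMap_pyRange_single a b (i:Int) _ hi.1 hi.2 (fun rr h1 h2 h3 => by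
            simp only [Function.comp]
            have : ¬ rr.toNat = i := by omega
            simp [this])]
      simp [hcj, hi]
    · rw [if_neg (by tauto)]
      refine List.filterMap_eq_nil_iff.mpr (fun rr hrr => ?_)
      have := PySem.List.mem_pyRange_one.mp hrr
      have hne : ¬ rr.toNat = i := by omega
      simp [Function.comp, hne]
  · rw [if_neg (by tauto)]
    refine List.filterMap_eq_nil_iff.mpr (fun rr hrr => ?_)
    simp [Function.comp, hcj]

-- the four trail contributions of one scanned cell (r, c) of A, at target (i, j)
theorem hitsA_cell (grid : List (List Int)) (minr maxr minc maxc r c : Int) (i j : Nat)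
    (hr : 0 ≤ r) (hc : 0 ≤ c)
    (h1 : 0 ≤ minr) (h2 : minr ≤ maxr) (h3 : 0 ≤ minc) (h4 : minc ≤ maxc) :
    hitsAt i j (cellWrites grid minr maxr minc maxc r c) =
      (let v := getC grid r c
       if srcB v = true ∧ r = (i:Int) ∧ minr ≤ r ∧ r ≤ maxr ∧ c < (j:Int) ∧ (j:Int) < minc
         then [v]
       else if srcB v = true ∧ r = (i:Int) ∧ minr ≤ r ∧ r ≤ maxr ∧ maxc < (j:Int) ∧ (j:Int) < c
         then [v]
       else if srcB v = true ∧ c = (j:Int) ∧ ¬(minr ≤ r ∧ r ≤ maxr) ∧ minc ≤ c ∧ c ≤ maxc ∧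
              r < (i:Int) ∧ (i:Int) < minr
         then [v]
       else if srcB v = true ∧ c = (j:Int) ∧ ¬(minr ≤ r ∧ r ≤ maxr) ∧ minc ≤ c ∧ c ≤ maxc ∧
              maxr < (i:Int) ∧ (i:Int) < r
         then [v]
       else []) := by
  unfold cellWrites
  dsimp only
  by_cases h0 : (getC grid r c == 0 || getC grid r c == 3) = true
  · have hs : srcB (getC grid r c) = false := by
      simp only [beq_iff_eq, Bool.or_eq_true] at h0
      simp [srcB]; omega
    rw [if_pos h0]
    simp [hitsAt, hs]
  · have hv : srcB (getC grid r c) = true := by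
      simp only [beq_iff_eq, Bool.or_eq_true] at h0
      simp [srcB]; omega
    rw [if_neg h0]
    simp only [hv, true_and]
    by_cases hband : minr ≤ r ∧ r ≤ maxr
    · rw [if_pos hband]
      by_cases hlt : c < minc
      · rw [if_pos hlt, hits_rowSeg _ _ _ _ i j (by omega) hr]
        split_ifs <;> first | rfl | (exfalso; omega)
      · rw [if_neg hlt]
        by_cases hgt : maxc < c
        · rw [if_pos hgt, hits_rowSeg _ _ _ _ i j (by omega) hr]
          split_ifs <;> first | rfl | (exfalso; omega)
        · rw [if_neg hgt]
          simp only [hitsAt, List.filterMap_nil]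
          split_ifs <;> first | rfl | (exfalso; omega)
    · rw [if_neg hband]
      by_cases hbc : minc ≤ c ∧ c ≤ maxc
      · rw [if_pos hbc]
        by_cases hrlt : r < minr
        · rw [if_pos hrlt, hits_colSeg _ _ _ _ i j (by omega) hc]
          split_ifs <;> first | rfl | (exfalso; omega)
        · rw [if_neg hrlt]
          by_cases hrgt : maxr < r
          · rw [if_pos hrgt, hits_colSeg _ _ _ _ i j (by omega) hc]
            split_ifs <;> first | rfl | (exfalso; omega)
          · rw [if_neg hrgt]
            simp only [hitsAt, List.filterMap_nil]
            split_ifs <;> first | rfl | (exfalso; omega)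
      · rw [if_neg hbc]
        simp only [hitsAt, List.filterMap_nil]
        split_ifs <;> first | rfl | (exfalso; omega)

theorem hitsAt_flatMap (i j : Nat) (l : List Int) (g : Int → List (Int × Int × Int)) :
    hitsAt i j (l.flatMap g) = l.flatMap (fun x => hitsAt i j (g x)) := by
  simp [hitsAt, List.filterMap_flatMap]

theorem hits_pull (i j : Nat) (find : Option Int) (r c : Int) (g : Int → Int) :
    hitsAt i j ((match find with
      | some x => [(r, c, g x)]
      | none => []) : List (Int × Int × Int)) =
      if r.toNat = i ∧ c.toNat = j then (find.map g).toList else [] := by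
  cases find <;> simp [hitsAt] <;> split_ifs <;> simp_all

theorem region_compare (d : Int) (l : List Int) (p : Int → Bool) (f : Int → Int) :
    ((l.filter p).map f).getLast?.getD d
      = (((l.reverse.find? p).map f).toList.getLast?.getD d) := by
  rw [getLast?_filter_map]
  cases h : l.reverse.find? p <;> simp

theorem mem_clusterOf (grid : List (List Int)) (r c : Int) :
    (r, c) ∈ clusterOf grid ↔
      (0 ≤ r ∧ r < rowsOf grid ∧ 0 ≤ c ∧ c < colsOf grid ∧ getC grid r c = 3) := by
  simp only [clusterOf, List.mem_flatMap, List.mem_map, List.mem_filter,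
    PySem.List.mem_pyRange_one, beq_iff_eq, Prod.mk.injEq, getC]
  constructor
  · rintro ⟨r', ⟨hr1, hr2⟩, c', ⟨⟨hc1, hc2⟩, h3⟩, rfl, rfl⟩
    exact ⟨hr1, hr2, hc1, hc2, h3⟩
  · rintro ⟨h1, h2, h3, h4, h5⟩
    exact ⟨r, ⟨h1, h2⟩, c, ⟨⟨h3, h4⟩, h5⟩, rfl, rfl⟩

theorem bbox_spec (grid : List (List Int)) (h : (clusterOf grid).isEmpty = false) :
    0 ≤ minrOf grid ∧ minrOf grid ≤ maxrOf grid ∧ maxrOf grid < rowsOf grid ∧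
    0 ≤ mincOf grid ∧ mincOf grid ≤ maxcOf grid ∧ maxcOf grid < colsOf grid := by
  have hne : clusterOf grid ≠ [] := by
    cases hcl : clusterOf grid
    · rw [hcl] at h; simp at h
    · simp
  obtain ⟨p, hp⟩ := List.exists_mem_of_ne_nil _ hne
  obtain ⟨mr, hmr⟩ : ∃ mr, PySem.List.min? ((clusterOf grid).map Prod.fst) (fun x => x) = some mr := by
    cases hm : PySem.List.min? ((clusterOf grid).map Prod.fst) (fun x => x) with
    | none => exact absurd (by simpa using (PySem.List.min?_eq_none_iff _ _).mp hm) hne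
    | some m => exact ⟨m, rfl⟩
  obtain ⟨Mr, hMr⟩ : ∃ m, PySem.List.max? ((clusterOf grid).map Prod.fst) (fun x => x) = some m := by
    cases hm : PySem.List.max? ((clusterOf grid).map Prod.fst) (fun x => x) with
    | none => exact absurd (by simpa using (PySem.List.max?_eq_none_iff _ _).mp hm) hne
    | some m => exact ⟨m, rfl⟩
  obtain ⟨mc, hmc⟩ : ∃ m, PySem.List.min? ((clusterOf grid).map Prod.snd) (fun x => x) = some m := by
    cases hm : PySem.List.min? ((clusterOf grid).map Prod.snd) (fun x => x) with
    | none => exact absurd (by simpa using (PySem.List.min?_eq_none_iff _ _).mp hm) hne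
    | some m => exact ⟨m, rfl⟩
  obtain ⟨Mc, hMc⟩ : ∃ m, PySem.List.max? ((clusterOf grid).map Prod.snd) (fun x => x) = some m := by
    cases hm : PySem.List.max? ((clusterOf grid).map Prod.snd) (fun x => x) with
    | none => exact absurd (by simpa using (PySem.List.max?_eq_none_iff _ _).mp hm) hne
    | some m => exact ⟨m, rfl⟩
  have e1 : minrOf grid = mr := by simp [minrOf, hmr]
  have e2 : maxrOf grid = Mr := by simp [maxrOf, hMr]
  have e3 : mincOf grid = mc := by simp [mincOf, hmc]
  have e4 : maxcOf grid = Mc := by simp [maxcOf, hMc]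
  obtain ⟨pr, hprmem, hpr⟩ :
      ∃ q, q ∈ clusterOf grid ∧ q.1 = mr := by
    have := PySem.List.min?_mem hmr
    obtain ⟨q, hq, hq2⟩ := List.mem_map.mp this
    exact ⟨q, hq, hq2⟩
  obtain ⟨pc, hpcmem, hpc⟩ :
      ∃ q, q ∈ clusterOf grid ∧ q.2 = mc := by
    have := PySem.List.min?_mem hmc
    obtain ⟨q, hq, hq2⟩ := List.mem_map.mp this
    exact ⟨q, hq, hq2⟩
  obtain ⟨qr, hqrmem, hqr⟩ :
      ∃ q, q ∈ clusterOf grid ∧ q.1 = Mr := by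
    have := PySem.List.max?_mem hMr
    obtain ⟨q, hq, hq2⟩ := List.mem_map.mp this
    exact ⟨q, hq, hq2⟩
  obtain ⟨qc, hqcmem, hqc⟩ :
      ∃ q, q ∈ clusterOf grid ∧ q.2 = Mc := by
    have := PySem.List.max?_mem hMc
    obtain ⟨q, hq, hq2⟩ := List.mem_map.mp this
    exact ⟨q, hq, hq2⟩
  have hbr := (mem_clusterOf grid pr.1 pr.2).mp (by simpa using hprmem)
  have hbc := (mem_clusterOf grid pc.1 pc.2).mp (by simpa using hpcmem)
  have hbR := (mem_clusterOf grid qr.1 qr.2).mp (by simpa using hqrmem)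
  have hbC := (mem_clusterOf grid qc.1 qc.2).mp (by simpa using hqcmem)
  have hminmaxr : mr ≤ p.1 ∧ p.1 ≤ Mr :=
    ⟨PySem.List.min?_isMin hmr _ (List.mem_map_of_mem hp),
     PySem.List.max?_isMax hMr _ (List.mem_map_of_mem hp)⟩
  have hminmaxc : mc ≤ p.2 ∧ p.2 ≤ Mc :=
    ⟨PySem.List.min?_isMin hmc _ (List.mem_map_of_mem hp),
     PySem.List.max?_isMax hMc _ (List.mem_map_of_mem hp)⟩
  rw [e1, e2, e3, e4]
  refine ⟨by rw [← hpr]; exact hbr.1, by omega, ?_, by rw [← hpc]; exact hbc.2.2.1, by omega, ?_⟩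
  · rw [← hqr]; exact hbR.2.1
  · rw [← hqc]; exact hbC.2.2.2.1

-- region L (row band, target left of the box): A's hits at (i,j)
theorem hitsA_L (grid : List (List Int)) (i j : Nat)
    (hb : 0 ≤ minrOf grid ∧ minrOf grid ≤ maxrOf grid ∧ maxrOf grid < rowsOf grid ∧
          0 ≤ mincOf grid ∧ mincOf grid ≤ maxcOf grid ∧ maxcOf grid < colsOf grid)
    (hI : minrOf grid ≤ (i:Int) ∧ (i:Int) ≤ maxrOf grid) (hJ : (j:Int) < mincOf grid) :
    hitsAt i j (wsA grid) =
      ((PySem.List.pyRange 0 (j:Int)).filter (fun x => srcB (getC grid (i:Int) x))).map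
        (fun x => getC grid (i:Int) x) := by
  obtain ⟨b1, b2, b3, b4, b5, b6⟩ := hb
  unfold wsA
  simp only [hitsAt_flatMap]
  have hside : ∀ r, 0 ≤ r → r < rowsOf grid → r ≠ (i:Int) →
      (PySem.List.pyRange 0 (colsOf grid)).flatMap (fun c =>
        hitsAt i j (cellWrites grid (minrOf grid) (maxrOf grid) (mincOf grid) (maxcOf grid) r c))
        = [] := by
    intro r hr0 hrR hrne
    refine flatMap_nil_of_all _ _ (fun c hcmem => ?_)
    have hcb := PySem.List.mem_pyRange_one.mp hcmem
    rw [hitsA_cell grid _ _ _ _ r c i j hr0 (by omega) b1 b2 b4 b5]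
    dsimp only
    split_ifs with hA hB hC hD
    · exact absurd hA.2.1 hrne
    · exact absurd hB.2.1 hrne
    · exfalso; obtain ⟨-, -, -, -, -, -, h7⟩ := hC; omega
    · exfalso; obtain ⟨-, -, -, -, -, h6, -⟩ := hD; omega
    · rfl
  rw [flatMap_pyRange_single 0 (rowsOf grid) (i:Int) _ (by omega) (by omega) hside]
  have hcell : ∀ c ∈ PySem.List.pyRange 0 (colsOf grid),
      hitsAt i j (cellWrites grid (minrOf grid) (maxrOf grid) (mincOf grid) (maxcOf grid)
        (i:Int) c) =
      (if (srcB (getC grid (i:Int) c) && decide (c < (j:Int))) = true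
        then [getC grid (i:Int) c] else []) := by
    intro c hcmem
    have hcb := PySem.List.mem_pyRange_one.mp hcmem
    rw [hitsA_cell grid _ _ _ _ _ c i j (by omega) (by omega) b1 b2 b4 b5]
    dsimp only
    by_cases hcnd : (srcB (getC grid (i:Int) c) && decide (c < (j:Int))) = true
    · rw [if_pos hcnd]
      have h12 : srcB (getC grid (i:Int) c) = true ∧ c < (j:Int) := by simpa using hcnd
      rw [if_pos ⟨h12.1, rfl, hI.1, hI.2, by simpa using h12.2, hJ⟩]
    · rw [if_neg hcnd]
      rw [if_neg (fun hc1 => hcnd (by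
        simp only [Bool.and_eq_true, decide_eq_true_eq]
        exact ⟨hc1.1, hc1.2.2.2.2.1⟩))]
      rw [if_neg (fun hc2 => by obtain ⟨-, -, -, -, h5, h6⟩ := hc2; omega)]
      rw [if_neg (fun hc3 => hc3.2.2.1 ⟨hI.1, hI.2⟩)]
      rw [if_neg (fun hc4 => hc4.2.2.1 ⟨hI.1, hI.2⟩)]
  rw [List.flatMap_congr hcell]
  rw [flatMap_ite_singleton]
  rw [PySem.List.pyRange_one_append 0 (j:Int) (colsOf grid) (by omega) (by omega)]
  rw [List.filter_append]
  have h2nil : (PySem.List.pyRange (j:Int) (colsOf grid)).filter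
      (fun x => srcB (getC grid (i:Int) x) && decide (x < (j:Int))) = [] := by
    refine List.filter_eq_nil_iff.mpr (fun c hcmem => ?_)
    have hcb := PySem.List.mem_pyRange_one.mp hcmem
    simp only [Bool.and_eq_true, decide_eq_true_eq, not_and]
    intro _; omega
  rw [h2nil, List.append_nil]
  congr 1
  refine List.filter_congr (fun c hcmem => ?_)
  have hcb := PySem.List.mem_pyRange_one.mp hcmem
  simp [hcb.2]

-- region L: B's hits at (i,j)
theorem hitsB_L (grid : List (List Int)) (i j : Nat)
    (hb : 0 ≤ minrOf grid ∧ minrOf grid ≤ maxrOf grid ∧ maxrOf grid < rowsOf grid ∧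
          0 ≤ mincOf grid ∧ mincOf grid ≤ maxcOf grid ∧ maxcOf grid < colsOf grid)
    (hI : minrOf grid ≤ (i:Int) ∧ (i:Int) ≤ maxrOf grid) (hJ : (j:Int) < mincOf grid) :
    hitsAt i j (wsB grid) =
      (((PySem.List.pyRange ((j:Int)-1) (-1) (-1)).find?
          (fun x => srcB (getC grid (i:Int) x))).map (fun x => getC grid (i:Int) x)).toList := by
  obtain ⟨b1, b2, b3, b4, b5, b6⟩ := hb
  unfold wsB
  rw [hitsAt_append, hitsAt_flatMap, hitsAt_flatMap]
  have hvert : (PySem.List.pyRange (mincOf grid) (maxcOf grid + 1)).flatMap (fun c =>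
      hitsAt i j ((PySem.List.pyRange 0 (minrOf grid)).flatMap (fun r => pullT grid r c)
        ++ (PySem.List.pyRange (maxrOf grid + 1) (rowsOf grid)).flatMap
            (fun r => pullB grid (rowsOf grid) r c))) = [] := by
    refine flatMap_nil_of_all _ _ (fun c hcmem => ?_)
    have hcb := PySem.List.mem_pyRange_one.mp hcmem
    rw [hitsAt_append, hitsAt_flatMap, hitsAt_flatMap]
    rw [flatMap_nil_of_all _ _ (fun r hrmem => ?_), flatMap_nil_of_all _ _ (fun r hrmem => ?_)]
    · rfl
    · unfold pullB; rw [hits_pull, if_neg (by rintro ⟨-, h2⟩; omega)]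
    · unfold pullT; rw [hits_pull, if_neg (by rintro ⟨-, h2⟩; omega)]
  rw [hvert, List.append_nil]
  have hside : ∀ r, minrOf grid ≤ r → r < maxrOf grid + 1 → r ≠ (i:Int) →
      hitsAt i j ((PySem.List.pyRange 0 (mincOf grid)).flatMap (fun c => pullL grid r c))
        ++ hitsAt i j ((PySem.List.pyRange (maxcOf grid + 1) (colsOf grid)).flatMap
            (fun c => pullR grid (colsOf grid) r c)) = [] := by
    intro r hr1 hr2 hrne
    rw [hitsAt_flatMap, hitsAt_flatMap]
    rw [flatMap_nil_of_all _ _ (fun c hcmem => ?_), flatMap_nil_of_all _ _ (fun c hcmem => ?_)]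
    · rfl
    · unfold pullR; rw [hits_pull, if_neg (by rintro ⟨h1, -⟩; omega)]
    · unfold pullL; rw [hits_pull, if_neg (by rintro ⟨h1, -⟩; omega)]
  have := flatMap_pyRange_single (minrOf grid) (maxrOf grid + 1) (i:Int)
    (fun r => hitsAt i j ((PySem.List.pyRange 0 (mincOf grid)).flatMap (fun c => pullL grid r c))
      ++ hitsAt i j ((PySem.List.pyRange (maxcOf grid + 1) (colsOf grid)).flatMap
          (fun c => pullR grid (colsOf grid) r c)))
    (by omega) (by omega) hside
  rw [show (fun r => hitsAt i j ((PySem.List.pyRange 0 (mincOf grid)).flatMap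
        (fun c => pullL grid r c)
      ++ (PySem.List.pyRange (maxcOf grid + 1) (colsOf grid)).flatMap
          (fun c => pullR grid (colsOf grid) r c))) =
      (fun r => hitsAt i j ((PySem.List.pyRange 0 (mincOf grid)).flatMap (fun c => pullL grid r c))
      ++ hitsAt i j ((PySem.List.pyRange (maxcOf grid + 1) (colsOf grid)).flatMap
          (fun c => pullR grid (colsOf grid) r c))) from funext (fun r => hitsAt_append i j _ _)]
  rw [this]
  dsimp only
  have hright : hitsAt i j ((PySem.List.pyRange (maxcOf grid + 1) (colsOf grid)).flatMap
      (fun c => pullR grid (colsOf grid) (i:Int) c)) = [] := by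
    rw [hitsAt_flatMap]
    refine flatMap_nil_of_all _ _ (fun c hcmem => ?_)
    have hcb := PySem.List.mem_pyRange_one.mp hcmem
    unfold pullR; rw [hits_pull, if_neg (by rintro ⟨-, h2⟩; omega)]
  rw [hright, List.append_nil, hitsAt_flatMap]
  have hcside : ∀ c, 0 ≤ c → c < mincOf grid → c ≠ (j:Int) →
      hitsAt i j (pullL grid (i:Int) c) = [] := by
    intro c h1 h2 h3
    unfold pullL; rw [hits_pull, if_neg (by rintro ⟨-, hc2⟩; omega)]
  rw [flatMap_pyRange_single 0 (mincOf grid) (j:Int) _ (by omega) (by omega) hcside]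
  unfold pullL
  rw [hits_pull, if_pos (by simp)]

-- region R (row band, target right of the box)
theorem hitsA_R (grid : List (List Int)) (i j : Nat)
    (hb : 0 ≤ minrOf grid ∧ minrOf grid ≤ maxrOf grid ∧ maxrOf grid < rowsOf grid ∧
          0 ≤ mincOf grid ∧ mincOf grid ≤ maxcOf grid ∧ maxcOf grid < colsOf grid)
    (hI : minrOf grid ≤ (i:Int) ∧ (i:Int) ≤ maxrOf grid) (hJ : maxcOf grid < (j:Int)) :
    hitsAt i j (wsA grid) =
      ((PySem.List.pyRange ((j:Int)+1) (colsOf grid)).filter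
        (fun x => srcB (getC grid (i:Int) x))).map (fun x => getC grid (i:Int) x) := by
  obtain ⟨b1, b2, b3, b4, b5, b6⟩ := hb
  unfold wsA
  simp only [hitsAt_flatMap]
  have hside : ∀ r, 0 ≤ r → r < rowsOf grid → r ≠ (i:Int) →
      (PySem.List.pyRange 0 (colsOf grid)).flatMap (fun c =>
        hitsAt i j (cellWrites grid (minrOf grid) (maxrOf grid) (mincOf grid) (maxcOf grid) r c))
        = [] := by
    intro r hr0 hrR hrne
    refine flatMap_nil_of_all _ _ (fun c hcmem => ?_)
    have hcb := PySem.List.mem_pyRange_one.mp hcmem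
    rw [hitsA_cell grid _ _ _ _ r c i j hr0 (by omega) b1 b2 b4 b5]
    dsimp only
    split_ifs with hA hB hC hD
    · exact absurd hA.2.1 hrne
    · exact absurd hB.2.1 hrne
    · exfalso; obtain ⟨-, -, -, -, -, -, h7⟩ := hC; omega
    · exfalso; obtain ⟨-, -, -, -, -, h6, -⟩ := hD; omega
    · rfl
  rw [flatMap_pyRange_single 0 (rowsOf grid) (i:Int) _ (by omega) (by omega) hside]
  have hcell : ∀ c ∈ PySem.List.pyRange 0 (colsOf grid),
      hitsAt i j (cellWrites grid (minrOf grid) (maxrOf grid) (mincOf grid) (maxcOf grid)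
        (i:Int) c) =
      (if (srcB (getC grid (i:Int) c) && decide ((j:Int) < c)) = true
        then [getC grid (i:Int) c] else []) := by
    intro c hcmem
    have hcb := PySem.List.mem_pyRange_one.mp hcmem
    rw [hitsA_cell grid _ _ _ _ _ c i j (by omega) (by omega) b1 b2 b4 b5]
    dsimp only
    by_cases hcnd : (srcB (getC grid (i:Int) c) && decide ((j:Int) < c)) = true
    · rw [if_pos hcnd]
      have h12 : srcB (getC grid (i:Int) c) = true ∧ (j:Int) < c := by simpa using hcnd
      rw [if_neg (fun hc1 => by obtain ⟨-, -, -, -, -, h6⟩ := hc1; omega)]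
      rw [if_pos ⟨h12.1, rfl, hI.1, hI.2, hJ, h12.2⟩]
    · rw [if_neg hcnd]
      rw [if_neg (fun hc1 => by obtain ⟨-, -, -, -, -, h6⟩ := hc1; omega)]
      rw [if_neg (fun hc2 => hcnd (by
        simp only [Bool.and_eq_true, decide_eq_true_eq]
        exact ⟨hc2.1, hc2.2.2.2.2.2⟩))]
      rw [if_neg (fun hc3 => hc3.2.2.1 ⟨hI.1, hI.2⟩)]
      rw [if_neg (fun hc4 => hc4.2.2.1 ⟨hI.1, hI.2⟩)]
  rw [List.flatMap_congr hcell]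
  rw [flatMap_ite_singleton]
  by_cases hJc : (j:Int) + 1 ≤ colsOf grid
  · rw [PySem.List.pyRange_one_append 0 ((j:Int)+1) (colsOf grid) (by omega) hJc]
    rw [List.filter_append]
    have h1nil : (PySem.List.pyRange 0 ((j:Int)+1)).filter
        (fun x => srcB (getC grid (i:Int) x) && decide ((j:Int) < x)) = [] := by
      refine List.filter_eq_nil_iff.mpr (fun c hcmem => ?_)
      have hcb := PySem.List.mem_pyRange_one.mp hcmem
      simp only [Bool.and_eq_true, decide_eq_true_eq, not_and]
      intro _; omega
    rw [h1nil, List.nil_append]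
    congr 1
    refine List.filter_congr (fun c hcmem => ?_)
    have hcb := PySem.List.mem_pyRange_one.mp hcmem
    simp [show (j:Int) < c by omega]
  · rw [pyRange_nil_of_le (show colsOf grid ≤ (j:Int) + 1 by omega)]
    simp only [List.filter_nil, List.map_nil]
    refine List.map_eq_nil_iff.mpr (List.filter_eq_nil_iff.mpr (fun c hcmem => ?_))
    have hcb := PySem.List.mem_pyRange_one.mp hcmem
    simp only [Bool.and_eq_true, decide_eq_true_eq, not_and]
    intro _; omega

theorem hitsB_R (grid : List (List Int)) (i j : Nat)
    (hb : 0 ≤ minrOf grid ∧ minrOf grid ≤ maxrOf grid ∧ maxrOf grid < rowsOf grid ∧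
          0 ≤ mincOf grid ∧ mincOf grid ≤ maxcOf grid ∧ maxcOf grid < colsOf grid)
    (hI : minrOf grid ≤ (i:Int) ∧ (i:Int) ≤ maxrOf grid) (hJ : maxcOf grid < (j:Int)) :
    hitsAt i j (wsB grid) =
      (((PySem.List.pyRange (colsOf grid - 1) (j:Int) (-1)).find?
          (fun x => srcB (getC grid (i:Int) x))).map (fun x => getC grid (i:Int) x)).toList := by
  obtain ⟨b1, b2, b3, b4, b5, b6⟩ := hb
  unfold wsB
  rw [hitsAt_append, hitsAt_flatMap, hitsAt_flatMap]
  have hvert : (PySem.List.pyRange (mincOf grid) (maxcOf grid + 1)).flatMap (fun c =>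
      hitsAt i j ((PySem.List.pyRange 0 (minrOf grid)).flatMap (fun r => pullT grid r c)
        ++ (PySem.List.pyRange (maxrOf grid + 1) (rowsOf grid)).flatMap
            (fun r => pullB grid (rowsOf grid) r c))) = [] := by
    refine flatMap_nil_of_all _ _ (fun c hcmem => ?_)
    have hcb := PySem.List.mem_pyRange_one.mp hcmem
    rw [hitsAt_append, hitsAt_flatMap, hitsAt_flatMap]
    rw [flatMap_nil_of_all _ _ (fun r hrmem => ?_), flatMap_nil_of_all _ _ (fun r hrmem => ?_)]
    · rfl
    · unfold pullB; rw [hits_pull, if_neg (by rintro ⟨-, h2⟩; omega)]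
    · unfold pullT; rw [hits_pull, if_neg (by rintro ⟨-, h2⟩; omega)]
  rw [hvert, List.append_nil]
  have hside : ∀ r, minrOf grid ≤ r → r < maxrOf grid + 1 → r ≠ (i:Int) →
      hitsAt i j ((PySem.List.pyRange 0 (mincOf grid)).flatMap (fun c => pullL grid r c))
        ++ hitsAt i j ((PySem.List.pyRange (maxcOf grid + 1) (colsOf grid)).flatMap
            (fun c => pullR grid (colsOf grid) r c)) = [] := by
    intro r hr1 hr2 hrne
    rw [hitsAt_flatMap, hitsAt_flatMap]
    rw [flatMap_nil_of_all _ _ (fun c hcmem => ?_), flatMap_nil_of_all _ _ (fun c hcmem => ?_)]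
    · rfl
    · unfold pullR; rw [hits_pull, if_neg (by rintro ⟨h1, -⟩; omega)]
    · unfold pullL; rw [hits_pull, if_neg (by rintro ⟨h1, -⟩; omega)]
  have := flatMap_pyRange_single (minrOf grid) (maxrOf grid + 1) (i:Int)
    (fun r => hitsAt i j ((PySem.List.pyRange 0 (mincOf grid)).flatMap (fun c => pullL grid r c))
      ++ hitsAt i j ((PySem.List.pyRange (maxcOf grid + 1) (colsOf grid)).flatMap
          (fun c => pullR grid (colsOf grid) r c)))
    (by omega) (by omega) hside
  rw [show (fun r => hitsAt i j ((PySem.List.pyRange 0 (mincOf grid)).flatMap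
        (fun c => pullL grid r c)
      ++ (PySem.List.pyRange (maxcOf grid + 1) (colsOf grid)).flatMap
          (fun c => pullR grid (colsOf grid) r c))) =
      (fun r => hitsAt i j ((PySem.List.pyRange 0 (mincOf grid)).flatMap (fun c => pullL grid r c))
      ++ hitsAt i j ((PySem.List.pyRange (maxcOf grid + 1) (colsOf grid)).flatMap
          (fun c => pullR grid (colsOf grid) r c))) from funext (fun r => hitsAt_append i j _ _)]
  rw [this]
  dsimp only
  have hleft : hitsAt i j ((PySem.List.pyRange 0 (mincOf grid)).flatMap
      (fun c => pullL grid (i:Int) c)) = [] := by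
    rw [hitsAt_flatMap]
    refine flatMap_nil_of_all _ _ (fun c hcmem => ?_)
    have hcb := PySem.List.mem_pyRange_one.mp hcmem
    unfold pullL; rw [hits_pull, if_neg (by rintro ⟨-, h2⟩; omega)]
  rw [hleft, List.nil_append, hitsAt_flatMap]
  by_cases hJc : (j:Int) < colsOf grid
  · have hcside : ∀ c, maxcOf grid + 1 ≤ c → c < colsOf grid → c ≠ (j:Int) →
        hitsAt i j (pullR grid (colsOf grid) (i:Int) c) = [] := by
      intro c h1 h2 h3
      unfold pullR; rw [hits_pull, if_neg (by rintro ⟨-, hc2⟩; omega)]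
    rw [flatMap_pyRange_single (maxcOf grid + 1) (colsOf grid) (j:Int) _ (by omega) (by omega)
      hcside]
    unfold pullR
    rw [hits_pull, if_pos (by simp)]
  · rw [flatMap_nil_of_all _ _ (fun c hcmem => ?_)]
    · rw [pyRange_neg_nil (show colsOf grid - 1 ≤ (j:Int) by omega)]
      simp
    · have hcb := PySem.List.mem_pyRange_one.mp hcmem
      unfold pullR; rw [hits_pull, if_neg (by rintro ⟨-, h2⟩; omega)]

-- region T (column band, target above the box)
theorem hitsA_T (grid : List (List Int)) (i j : Nat)
    (hb : 0 ≤ minrOf grid ∧ minrOf grid ≤ maxrOf grid ∧ maxrOf grid < rowsOf grid ∧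
          0 ≤ mincOf grid ∧ mincOf grid ≤ maxcOf grid ∧ maxcOf grid < colsOf grid)
    (hJ : mincOf grid ≤ (j:Int) ∧ (j:Int) ≤ maxcOf grid) (hI : (i:Int) < minrOf grid) :
    hitsAt i j (wsA grid) =
      ((PySem.List.pyRange 0 (i:Int)).filter (fun x => srcB (getC grid x (j:Int)))).map
        (fun x => getC grid x (j:Int)) := by
  obtain ⟨b1, b2, b3, b4, b5, b6⟩ := hb
  unfold wsA
  simp only [hitsAt_flatMap]
  have hrow : ∀ r ∈ PySem.List.pyRange 0 (rowsOf grid),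
      (PySem.List.pyRange 0 (colsOf grid)).flatMap (fun c =>
        hitsAt i j (cellWrites grid (minrOf grid) (maxrOf grid) (mincOf grid) (maxcOf grid) r c))
      = (if (srcB (getC grid r (j:Int)) && decide (r < (i:Int))) = true
          then [getC grid r (j:Int)] else []) := by
    intro r hrmem
    have hrb := PySem.List.mem_pyRange_one.mp hrmem
    have hcside : ∀ c, 0 ≤ c → c < colsOf grid → c ≠ (j:Int) →
        hitsAt i j (cellWrites grid (minrOf grid) (maxrOf grid) (mincOf grid) (maxcOf grid) r c)
          = [] := by
      intro c h1 h2 h3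
      rw [hitsA_cell grid _ _ _ _ r c i j (by omega) (by omega) b1 b2 b4 b5]
      dsimp only
      split_ifs with hA hB hC hD
      · exfalso; obtain ⟨-, e1, e2, -⟩ := hA; omega
      · exfalso; obtain ⟨-, e1, e2, -⟩ := hB; omega
      · exact absurd hC.2.1 h3
      · exact absurd hD.2.1 h3
      · rfl
    rw [flatMap_pyRange_single 0 (colsOf grid) (j:Int) _ (by omega) (by omega) hcside]
    rw [hitsA_cell grid _ _ _ _ r (j:Int) i j (by omega) (by omega) b1 b2 b4 b5]
    dsimp only
    by_cases hcnd : (srcB (getC grid r (j:Int)) && decide (r < (i:Int))) = true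
    · rw [if_pos hcnd]
      have h12 : srcB (getC grid r (j:Int)) = true ∧ r < (i:Int) := by simpa using hcnd
      rw [if_neg (fun hc1 => by obtain ⟨-, e1, e2, -⟩ := hc1; omega)]
      rw [if_neg (fun hc2 => by obtain ⟨-, e1, e2, -⟩ := hc2; omega)]
      rw [if_pos ⟨h12.1, rfl, fun hband => by omega, hJ.1, hJ.2, h12.2, hI⟩]
    · rw [if_neg hcnd]
      rw [if_neg (fun hc1 => by obtain ⟨-, e1, e2, -⟩ := hc1; omega)]
      rw [if_neg (fun hc2 => by obtain ⟨-, e1, e2, -⟩ := hc2; omega)]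
      rw [if_neg (fun hc3 => hcnd (by
        simp only [Bool.and_eq_true, decide_eq_true_eq]
        exact ⟨hc3.1, hc3.2.2.2.2.2.1⟩))]
      rw [if_neg (fun hc4 => by obtain ⟨-, -, -, -, -, e6, -⟩ := hc4; omega)]
  rw [List.flatMap_congr hrow]
  rw [flatMap_ite_singleton]
  rw [PySem.List.pyRange_one_append 0 (i:Int) (rowsOf grid) (by omega) (by omega)]
  rw [List.filter_append]
  have h2nil : (PySem.List.pyRange (i:Int) (rowsOf grid)).filter
      (fun x => srcB (getC grid x (j:Int)) && decide (x < (i:Int))) = [] := by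
    refine List.filter_eq_nil_iff.mpr (fun r hrmem => ?_)
    have hrb := PySem.List.mem_pyRange_one.mp hrmem
    simp only [Bool.and_eq_true, decide_eq_true_eq, not_and]
    intro _; omega
  rw [h2nil, List.append_nil]
  congr 1
  refine List.filter_congr (fun r hrmem => ?_)
  have hrb := PySem.List.mem_pyRange_one.mp hrmem
  simp [hrb.2]

theorem hitsB_T (grid : List (List Int)) (i j : Nat)
    (hb : 0 ≤ minrOf grid ∧ minrOf grid ≤ maxrOf grid ∧ maxrOf grid < rowsOf grid ∧
          0 ≤ mincOf grid ∧ mincOf grid ≤ maxcOf grid ∧ maxcOf grid < colsOf grid)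
    (hJ : mincOf grid ≤ (j:Int) ∧ (j:Int) ≤ maxcOf grid) (hI : (i:Int) < minrOf grid) :
    hitsAt i j (wsB grid) =
      (((PySem.List.pyRange ((i:Int)-1) (-1) (-1)).find?
          (fun x => srcB (getC grid x (j:Int)))).map (fun x => getC grid x (j:Int))).toList := by
  obtain ⟨b1, b2, b3, b4, b5, b6⟩ := hb
  unfold wsB
  rw [hitsAt_append, hitsAt_flatMap, hitsAt_flatMap]
  have hhor : (PySem.List.pyRange (minrOf grid) (maxrOf grid + 1)).flatMap (fun r =>
      hitsAt i j ((PySem.List.pyRange 0 (mincOf grid)).flatMap (fun c => pullL grid r c)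
        ++ (PySem.List.pyRange (maxcOf grid + 1) (colsOf grid)).flatMap
            (fun c => pullR grid (colsOf grid) r c))) = [] := by
    refine flatMap_nil_of_all _ _ (fun r hrmem => ?_)
    have hrb := PySem.List.mem_pyRange_one.mp hrmem
    rw [hitsAt_append, hitsAt_flatMap, hitsAt_flatMap]
    rw [flatMap_nil_of_all _ _ (fun c hcmem => ?_), flatMap_nil_of_all _ _ (fun c hcmem => ?_)]
    · rfl
    · unfold pullR; rw [hits_pull, if_neg (by rintro ⟨h1, -⟩; omega)]
    · unfold pullL; rw [hits_pull, if_neg (by rintro ⟨h1, -⟩; omega)]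
  rw [hhor, List.nil_append]
  have hcside : ∀ c, mincOf grid ≤ c → c < maxcOf grid + 1 → c ≠ (j:Int) →
      hitsAt i j ((PySem.List.pyRange 0 (minrOf grid)).flatMap (fun r => pullT grid r c))
        ++ hitsAt i j ((PySem.List.pyRange (maxrOf grid + 1) (rowsOf grid)).flatMap
            (fun r => pullB grid (rowsOf grid) r c)) = [] := by
    intro c h1 h2 h3
    rw [hitsAt_flatMap, hitsAt_flatMap]
    rw [flatMap_nil_of_all _ _ (fun r hrmem => ?_), flatMap_nil_of_all _ _ (fun r hrmem => ?_)]
    · rfl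
    · unfold pullB; rw [hits_pull, if_neg (by rintro ⟨-, h5⟩; omega)]
    · unfold pullT; rw [hits_pull, if_neg (by rintro ⟨-, h5⟩; omega)]
  have := flatMap_pyRange_single (mincOf grid) (maxcOf grid + 1) (j:Int)
    (fun c => hitsAt i j ((PySem.List.pyRange 0 (minrOf grid)).flatMap (fun r => pullT grid r c))
      ++ hitsAt i j ((PySem.List.pyRange (maxrOf grid + 1) (rowsOf grid)).flatMap
          (fun r => pullB grid (rowsOf grid) r c)))
    (by omega) (by omega) hcside
  rw [show (fun c => hitsAt i j ((PySem.List.pyRange 0 (minrOf grid)).flatMap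
        (fun r => pullT grid r c)
      ++ (PySem.List.pyRange (maxrOf grid + 1) (rowsOf grid)).flatMap
          (fun r => pullB grid (rowsOf grid) r c))) =
      (fun c => hitsAt i j ((PySem.List.pyRange 0 (minrOf grid)).flatMap (fun r => pullT grid r c))
      ++ hitsAt i j ((PySem.List.pyRange (maxrOf grid + 1) (rowsOf grid)).flatMap
          (fun r => pullB grid (rowsOf grid) r c))) from funext (fun c => hitsAt_append i j _ _)]
  rw [this]
  dsimp only
  have hbot : hitsAt i j ((PySem.List.pyRange (maxrOf grid + 1) (rowsOf grid)).flatMap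
      (fun r => pullB grid (rowsOf grid) r (j:Int))) = [] := by
    rw [hitsAt_flatMap]
    refine flatMap_nil_of_all _ _ (fun r hrmem => ?_)
    have hrb := PySem.List.mem_pyRange_one.mp hrmem
    unfold pullB; rw [hits_pull, if_neg (by rintro ⟨h1, -⟩; omega)]
  rw [hbot, List.append_nil, hitsAt_flatMap]
  have hrside : ∀ r, 0 ≤ r → r < minrOf grid → r ≠ (i:Int) →
      hitsAt i j (pullT grid r (j:Int)) = [] := by
    intro r h1 h2 h3
    unfold pullT; rw [hits_pull, if_neg (by rintro ⟨h4, -⟩; omega)]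
  rw [flatMap_pyRange_single 0 (minrOf grid) (i:Int) _ (by omega) (by omega) hrside]
  unfold pullT
  rw [hits_pull, if_pos (by simp)]

-- region B (column band, target below the box)
theorem hitsA_B (grid : List (List Int)) (i j : Nat)
    (hb : 0 ≤ minrOf grid ∧ minrOf grid ≤ maxrOf grid ∧ maxrOf grid < rowsOf grid ∧
          0 ≤ mincOf grid ∧ mincOf grid ≤ maxcOf grid ∧ maxcOf grid < colsOf grid)
    (hJ : mincOf grid ≤ (j:Int) ∧ (j:Int) ≤ maxcOf grid) (hI : maxrOf grid < (i:Int)) :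
    hitsAt i j (wsA grid) =
      ((PySem.List.pyRange ((i:Int)+1) (rowsOf grid)).filter
        (fun x => srcB (getC grid x (j:Int)))).map (fun x => getC grid x (j:Int)) := by
  obtain ⟨b1, b2, b3, b4, b5, b6⟩ := hb
  unfold wsA
  simp only [hitsAt_flatMap]
  have hrow : ∀ r ∈ PySem.List.pyRange 0 (rowsOf grid),
      (PySem.List.pyRange 0 (colsOf grid)).flatMap (fun c =>
        hitsAt i j (cellWrites grid (minrOf grid) (maxrOf grid) (mincOf grid) (maxcOf grid) r c))
      = (if (srcB (getC grid r (j:Int)) && decide ((i:Int) < r)) = true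
          then [getC grid r (j:Int)] else []) := by
    intro r hrmem
    have hrb := PySem.List.mem_pyRange_one.mp hrmem
    have hcside : ∀ c, 0 ≤ c → c < colsOf grid → c ≠ (j:Int) →
        hitsAt i j (cellWrites grid (minrOf grid) (maxrOf grid) (mincOf grid) (maxcOf grid) r c)
          = [] := by
      intro c h1 h2 h3
      rw [hitsA_cell grid _ _ _ _ r c i j (by omega) (by omega) b1 b2 b4 b5]
      dsimp only
      split_ifs with hA hB hC hD
      · exfalso; obtain ⟨-, e1, -, e2, -⟩ := hA; omega
      · exfalso; obtain ⟨-, e1, -, e2, -⟩ := hB; omega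
      · exact absurd hC.2.1 h3
      · exact absurd hD.2.1 h3
      · rfl
    rw [flatMap_pyRange_single 0 (colsOf grid) (j:Int) _ (by omega) (by omega) hcside]
    rw [hitsA_cell grid _ _ _ _ r (j:Int) i j (by omega) (by omega) b1 b2 b4 b5]
    dsimp only
    by_cases hcnd : (srcB (getC grid r (j:Int)) && decide ((i:Int) < r)) = true
    · rw [if_pos hcnd]
      have h12 : srcB (getC grid r (j:Int)) = true ∧ (i:Int) < r := by simpa using hcnd
      rw [if_neg (fun hc1 => by obtain ⟨-, e1, -, e2, -⟩ := hc1; omega)]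
      rw [if_neg (fun hc2 => by obtain ⟨-, e1, -, e2, -⟩ := hc2; omega)]
      rw [if_neg (fun hc3 => by obtain ⟨-, -, -, -, -, -, e7⟩ := hc3; omega)]
      rw [if_pos ⟨h12.1, rfl, fun hband => by omega, hJ.1, hJ.2, hI, h12.2⟩]
    · rw [if_neg hcnd]
      rw [if_neg (fun hc1 => by obtain ⟨-, e1, -, e2, -⟩ := hc1; omega)]
      rw [if_neg (fun hc2 => by obtain ⟨-, e1, -, e2, -⟩ := hc2; omega)]
      rw [if_neg (fun hc3 => by obtain ⟨-, -, -, -, -, -, e7⟩ := hc3; omega)]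
      rw [if_neg (fun hc4 => hcnd (by
        simp only [Bool.and_eq_true, decide_eq_true_eq]
        exact ⟨hc4.1, hc4.2.2.2.2.2.2⟩))]
  rw [List.flatMap_congr hrow]
  rw [flatMap_ite_singleton]
  by_cases hIr : (i:Int) + 1 ≤ rowsOf grid
  · rw [PySem.List.pyRange_one_append 0 ((i:Int)+1) (rowsOf grid) (by omega) hIr]
    rw [List.filter_append]
    have h1nil : (PySem.List.pyRange 0 ((i:Int)+1)).filter
        (fun x => srcB (getC grid x (j:Int)) && decide ((i:Int) < x)) = [] := by
      refine List.filter_eq_nil_iff.mpr (fun r hrmem => ?_)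
      have hrb := PySem.List.mem_pyRange_one.mp hrmem
      simp only [Bool.and_eq_true, decide_eq_true_eq, not_and]
      intro _; omega
    rw [h1nil, List.nil_append]
    congr 1
    refine List.filter_congr (fun r hrmem => ?_)
    have hrb := PySem.List.mem_pyRange_one.mp hrmem
    simp [show (i:Int) < r by omega]
  · rw [pyRange_nil_of_le (show rowsOf grid ≤ (i:Int) + 1 by omega)]
    simp only [List.filter_nil, List.map_nil]
    refine List.map_eq_nil_iff.mpr (List.filter_eq_nil_iff.mpr (fun r hrmem => ?_))
    have hrb := PySem.List.mem_pyRange_one.mp hrmem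
    simp only [Bool.and_eq_true, decide_eq_true_eq, not_and]
    intro _; omega

theorem hitsB_B (grid : List (List Int)) (i j : Nat)
    (hb : 0 ≤ minrOf grid ∧ minrOf grid ≤ maxrOf grid ∧ maxrOf grid < rowsOf grid ∧
          0 ≤ mincOf grid ∧ mincOf grid ≤ maxcOf grid ∧ maxcOf grid < colsOf grid)
    (hJ : mincOf grid ≤ (j:Int) ∧ (j:Int) ≤ maxcOf grid) (hI : maxrOf grid < (i:Int)) :
    hitsAt i j (wsB grid) =
      (((PySem.List.pyRange (rowsOf grid - 1) (i:Int) (-1)).find?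
          (fun x => srcB (getC grid x (j:Int)))).map (fun x => getC grid x (j:Int))).toList := by
  obtain ⟨b1, b2, b3, b4, b5, b6⟩ := hb
  unfold wsB
  rw [hitsAt_append, hitsAt_flatMap, hitsAt_flatMap]
  have hhor : (PySem.List.pyRange (minrOf grid) (maxrOf grid + 1)).flatMap (fun r =>
      hitsAt i j ((PySem.List.pyRange 0 (mincOf grid)).flatMap (fun c => pullL grid r c)
        ++ (PySem.List.pyRange (maxcOf grid + 1) (colsOf grid)).flatMap
            (fun c => pullR grid (colsOf grid) r c))) = [] := by
    refine flatMap_nil_of_all _ _ (fun r hrmem => ?_)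
    have hrb := PySem.List.mem_pyRange_one.mp hrmem
    rw [hitsAt_append, hitsAt_flatMap, hitsAt_flatMap]
    rw [flatMap_nil_of_all _ _ (fun c hcmem => ?_), flatMap_nil_of_all _ _ (fun c hcmem => ?_)]
    · rfl
    · unfold pullR; rw [hits_pull, if_neg (by rintro ⟨h1, -⟩; omega)]
    · unfold pullL; rw [hits_pull, if_neg (by rintro ⟨h1, -⟩; omega)]
  rw [hhor, List.nil_append]
  have hcside : ∀ c, mincOf grid ≤ c → c < maxcOf grid + 1 → c ≠ (j:Int) →
      hitsAt i j ((PySem.List.pyRange 0 (minrOf grid)).flatMap (fun r => pullT grid r c))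
        ++ hitsAt i j ((PySem.List.pyRange (maxrOf grid + 1) (rowsOf grid)).flatMap
            (fun r => pullB grid (rowsOf grid) r c)) = [] := by
    intro c h1 h2 h3
    rw [hitsAt_flatMap, hitsAt_flatMap]
    rw [flatMap_nil_of_all _ _ (fun r hrmem => ?_), flatMap_nil_of_all _ _ (fun r hrmem => ?_)]
    · rfl
    · unfold pullB; rw [hits_pull, if_neg (by rintro ⟨-, h5⟩; omega)]
    · unfold pullT; rw [hits_pull, if_neg (by rintro ⟨-, h5⟩; omega)]
  have := flatMap_pyRange_single (mincOf grid) (maxcOf grid + 1) (j:Int)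
    (fun c => hitsAt i j ((PySem.List.pyRange 0 (minrOf grid)).flatMap (fun r => pullT grid r c))
      ++ hitsAt i j ((PySem.List.pyRange (maxrOf grid + 1) (rowsOf grid)).flatMap
          (fun r => pullB grid (rowsOf grid) r c)))
    (by omega) (by omega) hcside
  rw [show (fun c => hitsAt i j ((PySem.List.pyRange 0 (minrOf grid)).flatMap
        (fun r => pullT grid r c)
      ++ (PySem.List.pyRange (maxrOf grid + 1) (rowsOf grid)).flatMap
          (fun r => pullB grid (rowsOf grid) r c))) =
      (fun c => hitsAt i j ((PySem.List.pyRange 0 (minrOf grid)).flatMap (fun r => pullT grid r c))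
      ++ hitsAt i j ((PySem.List.pyRange (maxrOf grid + 1) (rowsOf grid)).flatMap
          (fun r => pullB grid (rowsOf grid) r c))) from funext (fun c => hitsAt_append i j _ _)]
  rw [this]
  dsimp only
  have htop : hitsAt i j ((PySem.List.pyRange 0 (minrOf grid)).flatMap
      (fun r => pullT grid r (j:Int))) = [] := by
    rw [hitsAt_flatMap]
    refine flatMap_nil_of_all _ _ (fun r hrmem => ?_)
    have hrb := PySem.List.mem_pyRange_one.mp hrmem
    unfold pullT; rw [hits_pull, if_neg (by rintro ⟨h1, -⟩; omega)]
  rw [htop, List.nil_append, hitsAt_flatMap]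
  by_cases hIr : (i:Int) < rowsOf grid
  · have hrside : ∀ r, maxrOf grid + 1 ≤ r → r < rowsOf grid → r ≠ (i:Int) →
        hitsAt i j (pullB grid (rowsOf grid) r (j:Int)) = [] := by
      intro r h1 h2 h3
      unfold pullB; rw [hits_pull, if_neg (by rintro ⟨h4, -⟩; omega)]
    rw [flatMap_pyRange_single (maxrOf grid + 1) (rowsOf grid) (i:Int) _ (by omega) (by omega)
      hrside]
    unfold pullB
    rw [hits_pull, if_pos (by simp)]
  · rw [flatMap_nil_of_all _ _ (fun r hrmem => ?_)]
    · rw [pyRange_neg_nil (show rowsOf grid - 1 ≤ (i:Int) by omega)]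
      simp
    · have hrb := PySem.List.mem_pyRange_one.mp hrmem
      unfold pullB; rw [hits_pull, if_neg (by rintro ⟨h4, -⟩; omega)]

-- outside every trail region both write lists miss (i, j)
theorem hitsA_nil (grid : List (List Int)) (i j : Nat)
    (hb : 0 ≤ minrOf grid ∧ minrOf grid ≤ maxrOf grid ∧ maxrOf grid < rowsOf grid ∧
          0 ≤ mincOf grid ∧ mincOf grid ≤ maxcOf grid ∧ maxcOf grid < colsOf grid)
    (hn1 : ¬(minrOf grid ≤ (i:Int) ∧ (i:Int) ≤ maxrOf grid ∧ (j:Int) < mincOf grid))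
    (hn2 : ¬(minrOf grid ≤ (i:Int) ∧ (i:Int) ≤ maxrOf grid ∧ maxcOf grid < (j:Int)))
    (hn3 : ¬(mincOf grid ≤ (j:Int) ∧ (j:Int) ≤ maxcOf grid ∧ (i:Int) < minrOf grid))
    (hn4 : ¬(mincOf grid ≤ (j:Int) ∧ (j:Int) ≤ maxcOf grid ∧ maxrOf grid < (i:Int))) :
    hitsAt i j (wsA grid) = [] := by
  obtain ⟨b1, b2, b3, b4, b5, b6⟩ := hb
  unfold wsA
  simp only [hitsAt_flatMap]
  refine flatMap_nil_of_all _ _ (fun r hrmem => ?_)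
  have hrb := PySem.List.mem_pyRange_one.mp hrmem
  refine flatMap_nil_of_all _ _ (fun c hcmem => ?_)
  have hcb := PySem.List.mem_pyRange_one.mp hcmem
  rw [hitsA_cell grid _ _ _ _ r c i j (by omega) (by omega) b1 b2 b4 b5]
  dsimp only
  split_ifs with hA hB hC hD
  · exfalso; obtain ⟨-, e1, e2, e3, e4, e5⟩ := hA; exact hn1 ⟨by omega, by omega, by omega⟩
  · exfalso; obtain ⟨-, e1, e2, e3, e4, e5⟩ := hB; exact hn2 ⟨by omega, by omega, by omega⟩
  · exfalso; obtain ⟨-, e1, -, e3, e4, e5, e6⟩ := hC; exact hn3 ⟨by omega, by omega, by omega⟩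
  · exfalso; obtain ⟨-, e1, -, e3, e4, e5, e6⟩ := hD; exact hn4 ⟨by omega, by omega, by omega⟩
  · rfl

theorem hitsB_nil (grid : List (List Int)) (i j : Nat)
    (hb : 0 ≤ minrOf grid ∧ minrOf grid ≤ maxrOf grid ∧ maxrOf grid < rowsOf grid ∧
          0 ≤ mincOf grid ∧ mincOf grid ≤ maxcOf grid ∧ maxcOf grid < colsOf grid)
    (hn1 : ¬(minrOf grid ≤ (i:Int) ∧ (i:Int) ≤ maxrOf grid ∧ (j:Int) < mincOf grid))
    (hn2 : ¬(minrOf grid ≤ (i:Int) ∧ (i:Int) ≤ maxrOf grid ∧ maxcOf grid < (j:Int)))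
    (hn3 : ¬(mincOf grid ≤ (j:Int) ∧ (j:Int) ≤ maxcOf grid ∧ (i:Int) < minrOf grid))
    (hn4 : ¬(mincOf grid ≤ (j:Int) ∧ (j:Int) ≤ maxcOf grid ∧ maxrOf grid < (i:Int))) :
    hitsAt i j (wsB grid) = [] := by
  obtain ⟨b1, b2, b3, b4, b5, b6⟩ := hb
  unfold wsB
  rw [hitsAt_append, hitsAt_flatMap, hitsAt_flatMap]
  rw [flatMap_nil_of_all _ _ (fun r hrmem => ?_), flatMap_nil_of_all _ _ (fun c hcmem => ?_)]
  · rfl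
  · have hcb := PySem.List.mem_pyRange_one.mp hcmem
    rw [hitsAt_append, hitsAt_flatMap, hitsAt_flatMap]
    rw [flatMap_nil_of_all _ _ (fun r hrmem => ?_), flatMap_nil_of_all _ _ (fun r hrmem => ?_)]
    · rfl
    · have hrb := PySem.List.mem_pyRange_one.mp hrmem
      unfold pullB
      rw [hits_pull, if_neg (by rintro ⟨h1, h2⟩; exact hn4 ⟨by omega, by omega, by omega⟩)]
    · have hrb := PySem.List.mem_pyRange_one.mp hrmem
      unfold pullT
      rw [hits_pull, if_neg (by rintro ⟨h1, h2⟩; exact hn3 ⟨by omega, by omega, by omega⟩)]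
  · have hrb := PySem.List.mem_pyRange_one.mp hrmem
    rw [hitsAt_append, hitsAt_flatMap, hitsAt_flatMap]
    rw [flatMap_nil_of_all _ _ (fun c hcmem => ?_), flatMap_nil_of_all _ _ (fun c hcmem => ?_)]
    · rfl
    · have hcb := PySem.List.mem_pyRange_one.mp hcmem
      unfold pullR
      rw [hits_pull, if_neg (by rintro ⟨h1, h2⟩; exact hn2 ⟨by omega, by omega, by omega⟩)]
    · have hcb := PySem.List.mem_pyRange_one.mp hcmem
      unfold pullL
      rw [hits_pull, if_neg (by rintro ⟨h1, h2⟩; exact hn1 ⟨by omega, by omega, by omega⟩)]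

theorem hits_eq (grid : List (List Int)) (h : (clusterOf grid).isEmpty = false) (i j : Nat)
    (d : Int) :
    (hitsAt i j (wsA grid)).getLast?.getD d = (hitsAt i j (wsB grid)).getLast?.getD d := by
  have hb := bbox_spec grid h
  by_cases hband : minrOf grid ≤ (i:Int) ∧ (i:Int) ≤ maxrOf grid
  · by_cases hJlt : (j:Int) < mincOf grid
    · rw [hitsA_L grid i j hb hband hJlt, hitsB_L grid i j hb hband hJlt]
      rw [show PySem.List.pyRange ((j:Int)-1) (-1) (-1) = (PySem.List.pyRange 0 (j:Int)).reverse
        from by simpa using pyRange_desc_rev (-1) (j:Int)]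
      exact region_compare d _ _ _
    · by_cases hJgt : maxcOf grid < (j:Int)
      · rw [hitsA_R grid i j hb hband hJgt, hitsB_R grid i j hb hband hJgt]
        rw [show PySem.List.pyRange (colsOf grid - 1) (j:Int) (-1)
            = (PySem.List.pyRange ((j:Int)+1) (colsOf grid)).reverse
          from pyRange_desc_rev (j:Int) (colsOf grid)]
        exact region_compare d _ _ _
      · rw [hitsA_nil grid i j hb (by omega) (by omega) (by omega) (by omega),
            hitsB_nil grid i j hb (by omega) (by omega) (by omega) (by omega)]
  · by_cases hcol : mincOf grid ≤ (j:Int) ∧ (j:Int) ≤ maxcOf grid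
    · by_cases hIlt : (i:Int) < minrOf grid
      · rw [hitsA_T grid i j hb hcol hIlt, hitsB_T grid i j hb hcol hIlt]
        rw [show PySem.List.pyRange ((i:Int)-1) (-1) (-1) = (PySem.List.pyRange 0 (i:Int)).reverse
          from by simpa using pyRange_desc_rev (-1) (i:Int)]
        exact region_compare d _ _ _
      · have hIgt : maxrOf grid < (i:Int) := by omega
        rw [hitsA_B grid i j hb hcol hIgt, hitsB_B grid i j hb hcol hIgt]
        rw [show PySem.List.pyRange (rowsOf grid - 1) (i:Int) (-1)
            = (PySem.List.pyRange ((i:Int)+1) (rowsOf grid)).reverse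
          from pyRange_desc_rev (i:Int) (rowsOf grid)]
        exact region_compare d _ _ _
    · rw [hitsA_nil grid i j hb (by omega) (by omega) (by omega) (by omega),
          hitsB_nil grid i j hb (by omega) (by omega) (by omega) (by omega)]

theorem getElem_len_eq (res : List (List Int)) (i : Nat) (h : i < res.length) :
    res[i].length = ggRowLen res i := by
  simp [ggRowLen, List.getD_eq_getElem?_getD, List.getElem?_eq_getElem h]

theorem getElem_gg (res : List (List Int)) (i j : Nat) (hi : i < res.length)
    (hj : j < res[i].length) : res[i][j] = gg res i j := by
  simp [gg, List.getD_eq_getElem?_getD, List.getElem?_eq_getElem hi,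
    List.getElem?_eq_getElem hj]

theorem transform_main (grid : List (List Int)) :
    transform grid = transform_alt grid := by
  rw [transform_eq, transform_alt_eq]
  by_cases hcl : (clusterOf grid).isEmpty
  · rw [if_pos hcl, if_pos hcl]
  · rw [if_neg hcl, if_neg hcl]
    have hmapid : grid.map (fun row => row) = grid := by simp
    rw [hmapid]
    have hclf : (clusterOf grid).isEmpty = false := by
      cases hh : (clusterOf grid).isEmpty
      · rfl
      · exact absurd hh hcl
    refine List.ext_getElem (by rw [len_foldl_appW, len_foldl_appW]) (fun i hi1 hi2 => ?_)
    have hig : i < grid.length := by rw [len_foldl_appW] at hi1; exact hi1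
    have hrlA : ((wsA grid).foldl appW grid)[i].length = ggRowLen grid i := by
      rw [getElem_len_eq _ _ hi1, rowLen_foldl_appW]
    have hrlB : ((wsB grid).foldl appW grid)[i].length = ggRowLen grid i := by
      rw [getElem_len_eq _ _ hi2, rowLen_foldl_appW]
    refine List.ext_getElem (by rw [hrlA, hrlB]) (fun j hj1 hj2 => ?_)
    have hjg : j < ggRowLen grid i := by rw [hrlA] at hj1; exact hj1
    rw [getElem_gg _ _ _ hi1 hj1, getElem_gg _ _ _ hi2 hj2]
    rw [gg_foldl_appW _ _ _ _ hig hjg, gg_foldl_appW _ _ _ _ hig hjg]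
    exact hits_eq grid hclf i j _

-- ===== VERDICT (by name: the statement is the Claim_ definition above) =====
theorem transform_spec : Claim_equal_transform := by
  intro grid _ _
  exact transform_main grid
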